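-- pv_equiv track=rewrite | github.com/RytmeAnders/master-thesis | scripts/cgpi.py | inferCD
-- ===== SOURCE A (Python) =====
-- def inferCD(cds):
--     """Do inferential statistics on continuation desire. We try to find
--     a significant difference between discrete points in the narrative"""
--     t = []
--
--     # Convert int to int array
--     for cd in cds:
--         t.append([int(d) for d in str(cd)])
--
--     # Remove lists without all four indices
--     t = [i for i in t if len(i) == 4]
--
--     # Group cds that share the time in the narrative (group all the first
--     # indices, then the second, and so on)
--     cd_groups = []
--     for index in range(4):
--         cd_groups.append([i[index] for i in t])
--
--     return cd_groups
-- ===== SOURCE B (Python) =====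
-- def inferCD(cds):
--     """Single-pass scatter: parse each cd's digits and append each digit
--     directly to its column group; no intermediate list, no transpose pass."""
--     g0, g1, g2, g3 = [], [], [], []
--     for cd in cds:
--         digits = [int(d) for d in str(cd)]
--         if len(digits) == 4:
--             g0.append(digits[0])
--             g1.append(digits[1])
--             g2.append(digits[2])
--             g3.append(digits[3])
--     return [g0, g1, g2, g3]
-- ===== Notes on version B (the rewrite author's own statement) =====
-- stated objective: simpler
-- what changed: Replaces A's three passes (build digit lists, filter by length 4, then gather each column by scanning the filtered list four times) with one pass that parses each number and scatters its four digits directly into the four column lists.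
import Mathlib
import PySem

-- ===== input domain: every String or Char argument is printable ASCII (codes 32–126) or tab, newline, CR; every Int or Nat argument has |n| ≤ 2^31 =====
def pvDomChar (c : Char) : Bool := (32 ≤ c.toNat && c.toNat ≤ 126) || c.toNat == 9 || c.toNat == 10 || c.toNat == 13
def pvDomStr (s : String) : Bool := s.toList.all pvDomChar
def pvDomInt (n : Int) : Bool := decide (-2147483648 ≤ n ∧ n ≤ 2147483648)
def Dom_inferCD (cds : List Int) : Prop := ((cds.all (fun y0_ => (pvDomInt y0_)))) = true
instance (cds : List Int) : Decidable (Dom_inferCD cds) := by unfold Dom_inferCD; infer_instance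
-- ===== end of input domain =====

-- B fuses A's three passes (parse / filter / per-column gather) into one scatter pass; same return value on Pre_ (non-negative inputs).

-- ===== PORT A =====
-- [int(d) for d in str(cd)] : exact under Pre_ (cd ≥ 0 ⇒ every char of str(cd) is a digit;
-- on a negative cd Python raises ValueError at int('-'), which Pre_inferCD excludes).
def pyDigits (n : Int) : List Int :=
  (PySem.Int.toChars n).map (fun c => (PySem.Int.ofChars? [c]).getD 0)

def inferCD (cds : List Int) : List (List Int) :=
  let t := cds.foldl (fun acc cd => acc ++ [pyDigits cd]) []
  let t2 := t.filter (fun i => i.length == 4)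
  (PySem.List.pyRange 0 4 1).foldl
    (fun acc index => acc ++ [t2.map (fun i => PySem.List.pyGetD i index 0)]) []

-- ===== PORT B =====
-- the loop body: scatter the four digits into the four column accumulators
def altStep (g : List Int × List Int × List Int × List Int) (cd : Int) :
    List Int × List Int × List Int × List Int :=
  let digits := pyDigits cd
  if digits.length == 4 then
    (g.1 ++ [PySem.List.pyGetD digits 0 0],
     g.2.1 ++ [PySem.List.pyGetD digits 1 0],
     g.2.2.1 ++ [PySem.List.pyGetD digits 2 0],
     g.2.2.2 ++ [PySem.List.pyGetD digits 3 0])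
  else g

def inferCD_alt (cds : List Int) : List (List Int) :=
  let g := cds.foldl altStep ([], [], [], [])
  [g.1, g.2.1, g.2.2.1, g.2.2.2]

-- ===== PRECONDITION & SPEC =====
-- Pre_ excludes lists containing a negative int: there Python's int('-') raises ValueError (both A and B raise).
def Pre_inferCD (cds : List Int) : Prop := ∀ x ∈ cds, 0 ≤ x
instance (cds : List Int) : Decidable (Pre_inferCD cds) := by unfold Pre_inferCD; infer_instance
def pvWitness_inferCD : List Int := [1234, 56, 4010, 99999]

def Spec_inferCD (cds : List Int) (out : List (List Int)) : Prop := out = inferCD_alt cds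
instance (cds : List Int) (out : List (List Int)) : Decidable (Spec_inferCD cds out) := by unfold Spec_inferCD; infer_instance

-- ===== CLAIM (what is proved, stated in full; the proofs are below) =====
def Claim_equal_inferCD : Prop := ∀ (cds : List Int), Dom_inferCD cds → Pre_inferCD cds → Spec_inferCD cds (inferCD cds)

-- ===== LEMMAS AND PROOFS =====

-- column k of A's filtered digit-list table
def pvCol (cds : List Int) (k : Int) : List Int :=
  ((cds.map pyDigits).filter (fun i => i.length == 4)).map (fun i => PySem.List.pyGetD i k 0)

theorem pvCol_cons (cd : Int) (cds : List Int) (k : Int) :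
    pvCol (cd :: cds) k =
      (if (pyDigits cd).length == 4
       then PySem.List.pyGetD (pyDigits cd) k 0 :: pvCol cds k
       else pvCol cds k) := by
  simp only [pvCol, List.map_cons, List.filter_cons]
  split <;> simp_all

theorem inferCD_eq_cols (cds : List Int) :
    inferCD cds = [pvCol cds 0, pvCol cds 1, pvCol cds 2, pvCol cds 3] := by
  unfold inferCD
  rw [show PySem.List.pyRange 0 4 1 = [0, 1, 2, 3] from by decide]
  simp only [PySem.List.foldl_append_singleton_eq_map]
  simp [pvCol]

theorem altFold_eq (cds : List Int) (a b c d : List Int) :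
    cds.foldl altStep (a, b, c, d)
      = (a ++ pvCol cds 0, b ++ pvCol cds 1, c ++ pvCol cds 2, d ++ pvCol cds 3) := by
  induction cds generalizing a b c d with
  | nil => simp [pvCol]
  | cons cd cds ih =>
    rw [List.foldl_cons]
    by_cases h : ((pyDigits cd).length == 4) = true
    · rw [show altStep (a, b, c, d) cd =
            (a ++ [PySem.List.pyGetD (pyDigits cd) 0 0],
             b ++ [PySem.List.pyGetD (pyDigits cd) 1 0],
             c ++ [PySem.List.pyGetD (pyDigits cd) 2 0],
             d ++ [PySem.List.pyGetD (pyDigits cd) 3 0]) from by simp [altStep, h],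
          ih]
      simp [pvCol_cons, h]
    · rw [show altStep (a, b, c, d) cd = (a, b, c, d) from by simp [altStep, h], ih]
      simp [pvCol_cons, h]

theorem inferCD_alt_eq_cols (cds : List Int) :
    inferCD_alt cds = [pvCol cds 0, pvCol cds 1, pvCol cds 2, pvCol cds 3] := by
  simp [inferCD_alt, altFold_eq]

-- ===== VERDICT (by name: the statement is the Claim_ definition above) =====
theorem inferCD_spec : Claim_equal_inferCD := by
  intro cds _ _
  unfold Spec_inferCD
  rw [inferCD_eq_cols, inferCD_alt_eq_cols]
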